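-- pv_equiv track=rewrite | github.com/tlsdmswn01/CodingTest_Python | 프로그래머스/1/42840. 모의고사/모의고사.py | solution
-- ===== SOURCE A (Python) =====
-- def solution(answers):
--     answer = []
--     num1=[1,2,3,4,5]
--     num2=[2,1,2,3,2,4,2,5]
--     num3=[3,3,1,1,2,2,4,4,5,5]
--     score1,score2,score3=0,0,0
--
--     for i in range(len(answers)):
--         if len(answers)> len(num3):
--             num1=num1*len(answers)*2
--             num2=num2*len(answers)*2
--             num3=num3*len(answers)*2
--
--         if answers[i]==num1[i]:
--             score1+=1
--         if answers[i]==num2[i]: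
--             score2+=1
--         if answers[i]==num3[i]:
--             score3+=1
--     a=[score1,score2,score3]
--     b=max(a)
--     for j,h in enumerate(a):
--         if h==b:
--             answer.append(j+1)
--
--     return answer
-- ===== SOURCE B (Python) =====
-- def solution(answers):
--     patterns = [[1, 2, 3, 4, 5],
--                 [2, 1, 2, 3, 2, 4, 2, 5],
--                 [3, 3, 1, 1, 2, 2, 4, 4, 5, 5]]
--     # Bucket the answers once into a counter keyed by (index mod 40, value);
--     # 40 = lcm(5, 8, 10), so each pattern's score is 40 counter lookups.
--     cnt = {}
--     for i, a in enumerate(answers):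
--         key = (i % 40, a)
--         cnt[key] = cnt.get(key, 0) + 1
--     scores = [sum(cnt.get((r, pat[r % len(pat)]), 0) for r in range(40))
--               for pat in patterns]
--     best = max(scores)
--     return [k + 1 for k, s in enumerate(scores) if s == best]
-- ===== Notes on version B (the rewrite author's own statement) =====
-- stated objective: faster
-- what changed: B builds a counter keyed by (index mod 40, value) in one pass (40 = lcm of the pattern lengths) and computes each pattern's score as 40 counter lookups, replacing A's per-element comparisons against mutable, exponentially re-extended pattern lists; B also returns (instead of raising) for answer lengths 6-10.
-- crash fix: For answer lists of length 6 through 10 A raises IndexError (it extends its 5- and 8-element patterns only when the length exceeds 10), while B returns the top scorers. — e.g. on solution([1, 1, 1, 1, 1, 1]): A raises IndexError, B returns [1, 3]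
import Mathlib
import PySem

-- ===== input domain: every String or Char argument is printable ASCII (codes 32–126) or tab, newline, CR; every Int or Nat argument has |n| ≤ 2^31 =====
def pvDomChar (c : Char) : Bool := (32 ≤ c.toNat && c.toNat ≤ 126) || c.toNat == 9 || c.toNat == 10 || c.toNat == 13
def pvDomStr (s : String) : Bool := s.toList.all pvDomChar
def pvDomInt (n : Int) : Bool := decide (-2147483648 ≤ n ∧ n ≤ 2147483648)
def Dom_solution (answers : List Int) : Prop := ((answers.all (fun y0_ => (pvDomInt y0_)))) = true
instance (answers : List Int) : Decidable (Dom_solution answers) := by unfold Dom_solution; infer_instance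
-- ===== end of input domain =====

-- B buckets the answers once into a counter keyed by (index mod 40, value) — 40 = lcm of
-- the three pattern lengths — and scores each pattern by 40 counter lookups, instead of
-- A's per-element comparisons against mutable, re-extended pattern lists (objective: faster; the
-- timing run measured B ≥ 1.5× faster at the largest size).

-- ===== PORT A =====
-- Python `l * k` (list repetition)
def pyListMul (l : List Int) (k : Int) : List Int := (List.replicate k.toNat l).flatten

-- the body of A's `for i in range(len(answers))` loop, over the state
-- (num1, num2, num3, score1, score2, score3)
def stepA (answers : List Int)
    (st : List Int × List Int × List Int × Int × Int × Int) (i : Int) :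
    List Int × List Int × List Int × Int × Int × Int :=
  let (num1, num2, num3, s1, s2, s3) := st
  let (num1, num2, num3) :=
    if (answers.length : Int) > (num3.length : Int) then
      (pyListMul (pyListMul num1 answers.length) 2,
       pyListMul (pyListMul num2 answers.length) 2,
       pyListMul (pyListMul num3 answers.length) 2)
    else (num1, num2, num3)
  -- answers[i] / numk[i]: in range on Pre_; pyGetD's default is never used there
  let s1 := if PySem.List.pyGetD answers i 0 = PySem.List.pyGetD num1 i 0 then s1 + 1 else s1
  let s2 := if PySem.List.pyGetD answers i 0 = PySem.List.pyGetD num2 i 0 then s2 + 1 else s2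
  let s3 := if PySem.List.pyGetD answers i 0 = PySem.List.pyGetD num3 i 0 then s3 + 1 else s3
  (num1, num2, num3, s1, s2, s3)

def solution (answers : List Int) : List Int :=
  let st := (PySem.List.pyRange 0 answers.length 1).foldl (stepA answers)
    ([1, 2, 3, 4, 5], [2, 1, 2, 3, 2, 4, 2, 5], [3, 3, 1, 1, 2, 2, 4, 4, 5, 5], 0, 0, 0)
  let a := [st.2.2.2.1, st.2.2.2.2.1, st.2.2.2.2.2]
  let b := (PySem.List.max? a (fun x => x)).getD 0   -- `a` has 3 elements, so max? = some
  (PySem.List.enumerate a 0).foldl (fun ans jh => if jh.2 = b then ans ++ [jh.1 + 1] else ans) []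

-- ===== PORT B =====
def solution_alt (answers : List Int) : List Int :=
  let patterns : List (List Int) :=
    [[1, 2, 3, 4, 5], [2, 1, 2, 3, 2, 4, 2, 5], [3, 3, 1, 1, 2, 2, 4, 4, 5, 5]]
  -- one pass: counter keyed by (i % 40, a)
  let cnt : PySem.Dict (Int × Int) Int :=
    (PySem.List.enumerate answers 0).foldl
      (fun d ia =>
        let key := (PySem.Int.mod ia.1 40, ia.2)
        d.insert key (d.getD key 0 + 1))
      PySem.Dict.empty
  -- each pattern's score = 40 counter lookups
  let scores := patterns.map (fun pat =>
    (PySem.List.pyRange 0 40 1).foldl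
      (fun s r => s + cnt.getD (r, PySem.List.pyGetD pat (PySem.Int.mod r pat.length) 0) 0) 0)
  let best := (PySem.List.max? scores (fun x => x)).getD 0
  (PySem.List.enumerate scores 0).filterMap (fun ks => if ks.2 = best then some (ks.1 + 1) else none)

-- ===== PRECONDITION & SPEC =====
-- A raises IndexError on answer lists of length 6 through 10 (it extends its 5- and
-- 8-element pattern lists only when the length exceeds 10); Pre_ excludes exactly those.
def Pre_solution (answers : List Int) : Prop :=
  answers.length ≤ 5 ∨ 10 < answers.length
instance (answers : List Int) : Decidable (Pre_solution answers) := by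
  unfold Pre_solution; infer_instance
def pvWitness_solution : List Int := [1, 3, 2, 4, 2]

-- For answer lists of length 6 through 10 A raises IndexError while B returns the top scorers.
def Raises_solution (answers : List Int) : Prop :=
  6 ≤ answers.length ∧ answers.length ≤ 10
instance (answers : List Int) : Decidable (Raises_solution answers) := by
  unfold Raises_solution; infer_instance
def pvRaiseWitness_solution : List Int := [1, 1, 1, 1, 1, 1]
def pvRaiseWitnessOut_solution : List Int := [1, 3]

def Spec_solution (answers : List Int) (out : List Int) : Prop := out = solution_alt answers
instance (answers : List Int) (out : List Int) : Decidable (Spec_solution answers out) := by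
  unfold Spec_solution; infer_instance

-- ===== CLAIM (what is proved, stated in full; the proofs are below) =====
def Claim_equal_solution : Prop :=
  ∀ (answers : List Int), Dom_solution answers → Pre_solution answers →
    Spec_solution answers (solution answers)
def Claim_raises_solution : Prop :=
  (∀ (answers : List Int), Dom_solution answers → Raises_solution answers → ¬ Pre_solution answers) ∧
  (Dom_solution (pvRaiseWitness_solution) ∧ Raises_solution (pvRaiseWitness_solution) ∧
    solution_alt (pvRaiseWitness_solution) = pvRaiseWitnessOut_solution)

-- ===== LEMMAS AND PROOFS =====

-- the common value both programs compute for one pattern: a count over the enumerated answers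
def cntB (answers pat : List Int) : Int :=
  ((PySem.List.enumerate answers 0).countP
    (fun ia => decide (ia.2 = PySem.List.pyGetD pat (PySem.Int.mod ia.1 pat.length) 0)) : Int)

-- cntB as a count over the index range
theorem cntB_eq_range (answers pat : List Int) :
    cntB answers pat = ((PySem.List.pyRange 0 answers.length 1).countP
      (fun j => decide (PySem.List.pyGetD answers j 0
        = PySem.List.pyGetD pat (PySem.Int.mod j pat.length) 0)) : Int) := by
  unfold cntB
  rw [PySem.List.enumerate_eq_map_pyRange answers 0, List.countP_map]
  rfl

-- ---- A-side lemmas ----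

-- A's tuple fold with constant pattern lists splits into three counting folds
theorem tupleFold_const (answers N1 N2 N3 : List Int)
    (h : ¬ ((answers.length : Int) > (N3.length : Int)))
    (l : List Int) (s1 s2 s3 : Int) :
    l.foldl (stepA answers) (N1, N2, N3, s1, s2, s3) =
      (N1, N2, N3,
        s1 + (l.countP (fun i => decide (PySem.List.pyGetD answers i 0 = PySem.List.pyGetD N1 i 0)) : Int),
        s2 + (l.countP (fun i => decide (PySem.List.pyGetD answers i 0 = PySem.List.pyGetD N2 i 0)) : Int),
        s3 + (l.countP (fun i => decide (PySem.List.pyGetD answers i 0 = PySem.List.pyGetD N3 i 0)) : Int)) := by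
  induction l generalizing s1 s2 s3 with
  | nil => simp
  | cons x t ih =>
    simp only [List.foldl_cons, stepA, h, if_false, List.countP_cons]
    rw [ih]
    simp only [Prod.mk.injEq, true_and]
    refine ⟨?_, ?_, ?_⟩ <;> (split_ifs <;> simp_all <;> push_cast <;> ring)

theorem getD_flatten_replicate (p : List Int) (k i : Nat)
    (hi : i < k * p.length) :
    ((List.replicate k p).flatten.getD i 0) = p.getD (i % p.length) 0 := by
  induction k generalizing i with
  | zero => simp at hi
  | succ k ih =>
    rw [Nat.succ_mul] at hi
    rw [List.replicate_succ, List.flatten_cons]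
    rcases lt_or_ge i p.length with hlt | hge
    · rw [List.getD_append _ _ _ _ hlt, Nat.mod_eq_of_lt hlt]
    · rw [List.getD_append_right _ _ _ _ hge, ih _ (by omega : i - p.length < k * p.length)]
      rw [(Nat.mod_eq_sub_mod hge).symm]

theorem flatten_flatten_replicate (m k : Nat) (p : List Int) :
    (List.replicate m ((List.replicate k p).flatten)).flatten = (List.replicate (m * k) p).flatten := by
  induction m with
  | zero => simp
  | succ m ih =>
    rw [List.replicate_succ, List.flatten_cons, ih, Nat.succ_mul, Nat.add_comm,
      List.replicate_add, List.flatten_append]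

-- index into the doubly-repeated list = modulo index into the base pattern
theorem idx_big (p : List Int) (n i : Int) (h0 : 0 ≤ i) (hi : i < n) (hp : p ≠ []) :
    PySem.List.pyGetD (pyListMul (pyListMul p n) 2) i 0
      = PySem.List.pyGetD p (PySem.Int.mod i p.length) 0 := by
  have hplen : 0 < p.length := List.length_pos_iff.mpr hp
  obtain ⟨m, rfl⟩ : ∃ m : Nat, i = (m : Int) := ⟨i.toNat, (Int.toNat_of_nonneg h0).symm⟩
  rw [PySem.Int.mod_natCast, PySem.List.pyGetD_natCast, PySem.List.pyGetD_natCast]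
  show ((List.replicate ((2:Int)).toNat ((List.replicate n.toNat p).flatten)).flatten).getD m 0 = _
  rw [flatten_flatten_replicate, getD_flatten_replicate]
  have : m < n.toNat := by omega
  calc m < n.toNat := this
    _ ≤ (2:Int).toNat * n.toNat * p.length := by
        have h2 : (2:Int).toNat = 2 := rfl
        rw [h2]; nlinarith [hplen]

theorem idx_small (p : List Int) (i : Int) (h0 : 0 ≤ i) (hi : i < p.length) :
    PySem.List.pyGetD p (PySem.Int.mod i p.length) 0 = PySem.List.pyGetD p i 0 := by
  obtain ⟨m, rfl⟩ : ∃ m : Nat, i = (m : Int) := ⟨i.toNat, (Int.toNat_of_nonneg h0).symm⟩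
  rw [PySem.Int.mod_natCast, Nat.mod_eq_of_lt (by exact_mod_cast hi)]

theorem length_pyListMul (l : List Int) (k : Int) :
    (pyListMul l k).length = k.toNat * l.length := by
  simp [pyListMul]

-- the answer-building loop of A equals the comprehension of B, for any scores list
theorem tail_eq (l : List (Int × Int)) (b : Int) (acc : List Int) :
    l.foldl (fun ans jh => if jh.2 = b then ans ++ [jh.1 + 1] else ans) acc
      = acc ++ l.filterMap (fun js => if js.2 = b then some (js.1 + 1) else none) := by
  induction l generalizing acc with
  | nil => simp
  | cons x t ih =>
    simp only [List.foldl_cons, List.filterMap_cons]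
    split_ifs with h
    · simp [ih, h]
    · simp [ih, h]

-- A's scoring loop produces exactly the three cntB pattern scores
theorem scores_eq (answers : List Int) (hPre : Pre_solution answers) :
    ∃ M1 M2 M3 : List Int,
      (PySem.List.pyRange 0 answers.length 1).foldl (stepA answers)
        ([1, 2, 3, 4, 5], [2, 1, 2, 3, 2, 4, 2, 5], [3, 3, 1, 1, 2, 2, 4, 4, 5, 5], 0, 0, 0)
      = (M1, M2, M3,
          cntB answers [1, 2, 3, 4, 5],
          cntB answers [2, 1, 2, 3, 2, 4, 2, 5],
          cntB answers [3, 3, 1, 1, 2, 2, 4, 4, 5, 5]) := by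
  rcases hPre with h5 | h10
  · -- length ≤ 5: the patterns are never extended and indices stay below every pattern length
    refine ⟨[1, 2, 3, 4, 5], [2, 1, 2, 3, 2, 4, 2, 5], [3, 3, 1, 1, 2, 2, 4, 4, 5, 5], ?_⟩
    rw [tupleFold_const answers _ _ _ (by simp; omega)]
    simp only [Prod.mk.injEq, true_and]
    refine ⟨?_, ?_, ?_⟩ <;>
    · rw [cntB_eq_range]
      simp only [zero_add]
      congr 1
      apply List.countP_congr
      intro j hj
      rw [PySem.List.mem_pyRange_one] at hj
      rw [idx_small _ j hj.1 (by simp; omega)]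
  · -- length > 10: the first iteration replaces the patterns by repeated copies
    have hn : (0:Int) < answers.length := by exact_mod_cast (by omega : 0 < answers.length)
    refine ⟨pyListMul (pyListMul [1, 2, 3, 4, 5] answers.length) 2,
      pyListMul (pyListMul [2, 1, 2, 3, 2, 4, 2, 5] answers.length) 2,
      pyListMul (pyListMul [3, 3, 1, 1, 2, 2, 4, 4, 5, 5] answers.length) 2, ?_⟩
    rw [PySem.List.pyRange_one_cons hn, List.foldl_cons]
    have hcond : ((answers.length : Int) > (([3, 3, 1, 1, 2, 2, 4, 4, 5, 5] : List Int).length : Int)) := by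
      simp; omega
    simp only [stepA, hcond, if_true]
    rw [tupleFold_const answers _ _ _ (by
      rw [length_pyListMul, length_pyListMul]
      simp
      omega)]
    simp only [Prod.mk.injEq, true_and, zero_add]
    have key : ∀ t : List Int, t ≠ [] →
        (if PySem.List.pyGetD answers 0 0
            = PySem.List.pyGetD (pyListMul (pyListMul t (answers.length : Int)) 2) 0 0
          then (1:Int) else 0)
          + ((PySem.List.pyRange 1 (answers.length : Int) 1).countP
              (fun i => decide (PySem.List.pyGetD answers i 0
                = PySem.List.pyGetD (pyListMul (pyListMul t (answers.length : Int)) 2) i 0)) : Int)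
          = cntB answers t := by
      intro t ht
      rw [cntB_eq_range, PySem.List.pyRange_one_cons hn, List.countP_cons]
      rw [idx_big t _ 0 le_rfl hn ht]
      have hc : (PySem.List.pyRange (0+1) (answers.length : Int) 1).countP
            (fun i => decide (PySem.List.pyGetD answers i 0
              = PySem.List.pyGetD (pyListMul (pyListMul t (answers.length : Int)) 2) i 0))
          = (PySem.List.pyRange (0+1) (answers.length : Int) 1).countP
            (fun j => decide (PySem.List.pyGetD answers j 0
              = PySem.List.pyGetD t (PySem.Int.mod j t.length) 0)) := by
        apply List.countP_congr
        intro j hj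
        rw [PySem.List.mem_pyRange_one] at hj
        rw [idx_big t _ j (by omega) hj.2 ht]
      rw [show ((0:Int)+1) = 1 from rfl] at hc
      rw [hc]
      push_cast
      split_ifs <;> simp_all <;> ring
    exact ⟨key _ (by simp), key _ (by simp), key _ (by simp)⟩

-- ---- B-side lemmas ----

-- an indicator summed over a nodup list containing c picks out the single value
theorem sum_indicator (L : List Int) (hL : L.Nodup) (c : Int) (hc : c ∈ L) (x : Int) :
    (L.map (fun r => if r = c then x else (0:Int))).sum = x := by
  induction L with
  | nil => simp at hc
  | cons a t ih =>
    rw [List.map_cons, List.sum_cons]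
    by_cases hac : a = c
    · subst hac
      rw [if_pos rfl]
      have hzero : (t.map (fun r => if r = a then x else (0:Int))).sum = 0 := by
        apply List.sum_eq_zero
        intro y hy
        rw [List.mem_map] at hy
        obtain ⟨r, hr, rfl⟩ := hy
        have hra : r ≠ a := fun h => (List.nodup_cons.mp hL).1 (h ▸ hr)
        simp [hra]
      rw [hzero]; ring
    · have hct : c ∈ t := (List.mem_cons.mp hc).resolve_left (fun h => hac h.symm)
      rw [if_neg hac, ih (List.nodup_cons.mp hL).2 hct, zero_add]

-- summing the counter lookups over all 40 residues counts the matching pairs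
theorem sum_count_eq_countP (v : Int → Int) (K : List (Int × Int))
    (hK : ∀ p ∈ K, p.1 ∈ PySem.List.pyRange 0 40 1) :
    ((PySem.List.pyRange 0 40 1).map (fun r => (K.count (r, v r) : Int))).sum
      = (K.countP (fun p => decide (p.2 = v p.1)) : Int) := by
  induction K with
  | nil => simp
  | cons x t ih =>
    obtain ⟨x1, x2⟩ := x
    have hx : x1 ∈ PySem.List.pyRange 0 40 1 := hK (x1, x2) List.mem_cons_self
    have ht : ∀ p ∈ t, p.1 ∈ PySem.List.pyRange 0 40 1 :=
      fun p hp => hK p (List.mem_cons_of_mem _ hp)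
    have hcount : ∀ r : Int, (((x1, x2) :: t).count (r, v r) : Int)
        = (t.count (r, v r) : Int)
          + (if r = x1 then (if x2 = v x1 then (1:Int) else 0) else 0) := by
      intro r
      rw [List.count_cons]
      by_cases h1 : r = x1
      · subst h1
        by_cases h2 : x2 = v r
        · have hb : ((r, x2) == (r, v r)) = true := by simp [h2]
          simp [h2]
        · have hb : ((r, x2) == (r, v r)) = false := by simp [h2]
          simp [hb, h2]
      · have hb : ((x1, x2) == (r, v r)) = false := by
          simp
          intro h
          exact absurd h.symm h1
        simp [hb, h1]
    calc ((PySem.List.pyRange 0 40 1).map (fun r => (((x1, x2) :: t).count (r, v r) : Int))).sum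
        = ((PySem.List.pyRange 0 40 1).map (fun r => (t.count (r, v r) : Int))).sum
          + ((PySem.List.pyRange 0 40 1).map
              (fun r => if r = x1 then (if x2 = v x1 then (1:Int) else 0) else 0)).sum := by
          simp only [hcount]
          rw [← PySem.List.sum_map_add_int]
      _ = (t.countP (fun p => decide (p.2 = v p.1)) : Int)
          + (if x2 = v x1 then (1:Int) else 0) := by
          rw [ih ht, sum_indicator _ (PySem.List.nodup_pyRange_one 0 40) x1 hx]
      _ = (((x1, x2) :: t).countP (fun p => decide (p.2 = v p.1)) : Int) := by
          rw [List.countP_cons]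
          split_ifs with h <;> simp_all

-- B's score for a pattern whose length divides 40 is cntB
theorem scoreB_eq_cntB (answers pat : List Int) (hdvd : pat.length ∣ 40) :
    (PySem.List.pyRange 0 40 1).foldl
      (fun s r => s + ((PySem.List.enumerate answers 0).foldl
          (fun d ia =>
            let key := (PySem.Int.mod ia.1 40, ia.2)
            d.insert key (d.getD key 0 + 1))
          PySem.Dict.empty).getD (r, PySem.List.pyGetD pat (PySem.Int.mod r pat.length) 0) 0) 0
    = cntB answers pat := by
  -- the counter fold is Dict.counter of the keyed list K
  have hcnt : (PySem.List.enumerate answers 0).foldl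
      (fun d ia =>
        let key := (PySem.Int.mod ia.1 40, ia.2)
        d.insert key (d.getD key 0 + 1))
      PySem.Dict.empty
      = PySem.Dict.counter ((PySem.List.enumerate answers 0).map
          (fun ia => (PySem.Int.mod ia.1 40, ia.2))) := by
    rw [← PySem.Dict.foldl_insert_getD_add_one_eq_counter, List.foldl_map]
  rw [hcnt, PySem.List.foldl_add]
  simp only [PySem.Dict.getD_counter, zero_add]
  set v : Int → Int := fun r => PySem.List.pyGetD pat (PySem.Int.mod r pat.length) 0 with hv
  set K := (PySem.List.enumerate answers 0).map (fun ia => (PySem.Int.mod ia.1 40, ia.2)) with hKdef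
  have hK : ∀ p ∈ K, p.1 ∈ PySem.List.pyRange 0 40 1 := by
    intro p hp
    rw [hKdef, List.mem_map] at hp
    obtain ⟨ia, hia, rfl⟩ := hp
    rw [PySem.List.mem_enumerate_iff] at hia
    obtain ⟨k, hk, rfl⟩ := hia
    rw [PySem.List.mem_pyRange_one]
    simp only [zero_add]
    rw [show (40:Int) = ((40:Nat):Int) from rfl, PySem.Int.mod_natCast]
    constructor
    · exact_mod_cast Nat.zero_le _
    · exact_mod_cast Nat.mod_lt _ (by norm_num)
  rw [sum_count_eq_countP v K hK]
  rw [hKdef, List.countP_map]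
  unfold cntB
  congr 1
  apply List.countP_congr
  intro ia hia
  rw [PySem.List.mem_enumerate_iff] at hia
  obtain ⟨k, hk, rfl⟩ := hia
  simp only [Function.comp, zero_add, hv]
  rw [PySem.Int.mod_natCast]
  rw [show (40:Int) = ((40:Nat):Int) from rfl]
  rw [PySem.Int.mod_natCast]
  rw [PySem.Int.mod_natCast]
  rw [Nat.mod_mod_of_dvd k hdvd]

-- ===== VERDICT =====

theorem solution_raises : Claim_raises_solution := by
  unfold Claim_raises_solution
  exact ⟨by intro a _ hr; unfold Raises_solution at hr; unfold Pre_solution; omega, by decide⟩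

theorem solution_spec : Claim_equal_solution := by
  have _uses_raises := solution_raises
  intro answers _ hPre
  unfold Spec_solution solution solution_alt
  obtain ⟨M1, M2, M3, hM⟩ := scores_eq answers hPre
  rw [hM]
  simp only [List.map_cons, List.map_nil]
  simp only [scoreB_eq_cntB answers [1, 2, 3, 4, 5] (by norm_num),
      scoreB_eq_cntB answers [2, 1, 2, 3, 2, 4, 2, 5] (by norm_num),
      scoreB_eq_cntB answers [3, 3, 1, 1, 2, 2, 4, 4, 5, 5] (by norm_num)]
  rw [tail_eq]
  simp
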